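-- pv_equiv track=rewrite | github.com/stofnun-arna-magnussonar/idioms_names_test_suite | idioms/score_idioms.py | check_tokens
-- ===== SOURCE A (Python) =====
-- def check_tokens(tokenlist, forms_1, forms_2, mydistance):
--     for i, token in enumerate(tokenlist):
--         if token in forms_1:
--             start = max(0, i - mydistance)
--             end = min(len(tokenlist), i + mydistance + 1)
--             for j in range(start, end):
--                 if tokenlist[j] in forms_2:
--                     return True
--     return False
-- ===== SOURCE B (Python) =====
-- def check_tokens(tokenlist, forms_1, forms_2, mydistance):
--     s1 = set(forms_1)
--     s2 = set(forms_2)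
--     n = len(tokenlist)
--     # prefix[k] = number of tokens among tokenlist[:k] that are in forms_2 (one O(1) lookup per window)
--     prefix = [0]
--     c = 0
--     for t in tokenlist:
--         if t in s2:
--             c += 1
--         prefix.append(c)
--     for i, t in enumerate(tokenlist):
--         if t in s1:
--             start = max(0, i - mydistance)
--             end = min(n, i + mydistance + 1)
--             if start < end and prefix[end] - prefix[start] > 0:
--                 return True
--     return False
-- ===== Notes on version B (the rewrite author's own statement) =====
-- stated objective: alternative
-- what changed: B converts forms_1/forms_2 to sets and precomputes a prefix-count array of forms_2 hits, so each window is answered by one prefix-difference comparison instead of A's rescan of up to 2*mydistance+1 tokens each doing a linear list-membership test; A's early return on easy inputs means B is not measurably faster on the benchmark workloads.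
import Mathlib
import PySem

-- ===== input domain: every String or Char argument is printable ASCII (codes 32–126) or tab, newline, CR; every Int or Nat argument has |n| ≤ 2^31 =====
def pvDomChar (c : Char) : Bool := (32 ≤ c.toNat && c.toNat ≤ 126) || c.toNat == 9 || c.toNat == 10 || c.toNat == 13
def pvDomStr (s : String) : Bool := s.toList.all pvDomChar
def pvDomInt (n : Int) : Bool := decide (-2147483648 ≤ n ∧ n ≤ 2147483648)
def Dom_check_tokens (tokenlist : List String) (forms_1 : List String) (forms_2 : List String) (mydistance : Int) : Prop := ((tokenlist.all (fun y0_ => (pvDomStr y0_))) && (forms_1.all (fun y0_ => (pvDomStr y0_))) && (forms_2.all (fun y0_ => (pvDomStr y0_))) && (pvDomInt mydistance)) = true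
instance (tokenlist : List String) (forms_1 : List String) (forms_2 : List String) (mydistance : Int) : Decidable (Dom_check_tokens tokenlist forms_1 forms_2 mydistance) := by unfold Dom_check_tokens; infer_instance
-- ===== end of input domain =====

-- B replaces A's per-hit rescan of the window (list-membership tests per window position) by set
-- lookups and one prefix-count array, answering each window query by a single subtraction; same
-- return value everywhere (alternative structure; not measured faster on the generated workloads).

-- ===== PORT A =====
-- outer 'for i, token in enumerate(tokenlist)' with early return; the inner
-- 'for j in range(start, end): if …: return True' is the Bool any over the range
def check_tokens_loop (tokenlist : List String) (forms_1 : List String) (forms_2 : List String) (mydistance : Int) : List (Int × String) → Bool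
  | [] => false
  | (i, token) :: rest =>
    if forms_1.contains token then
      let start := max 0 (i - mydistance)
      let stop := min (tokenlist.length : Int) (i + mydistance + 1)
      if (PySem.List.pyRange start stop 1).any
          (fun j => forms_2.contains (PySem.List.pyGetD tokenlist j "")) then true
      else check_tokens_loop tokenlist forms_1 forms_2 mydistance rest
    else check_tokens_loop tokenlist forms_1 forms_2 mydistance rest

def check_tokens (tokenlist : List String) (forms_1 : List String) (forms_2 : List String) (mydistance : Int) : Bool :=
  check_tokens_loop tokenlist forms_1 forms_2 mydistance (PySem.List.enumerate tokenlist 0)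

-- ===== PORT B =====
-- the prefix-building loop of Source B: state (prefix, c)
def check_tokens_alt_prefix (s2 : PySem.Set String) (xs : List String) : List Int × Int :=
  xs.foldl (fun st t =>
    let c := if PySem.Set.contains s2 t then st.2 + 1 else st.2
    (st.1 ++ [c], c)) ([0], 0)

-- the scanning loop of Source B: each window answered from the prefix array
def check_tokens_alt_loop (s1 : PySem.Set String) (pr : List Int) (n : Int) (mydistance : Int) : List (Int × String) → Bool
  | [] => false
  | (i, t) :: rest =>
    if PySem.Set.contains s1 t then
      let start := max 0 (i - mydistance)
      let stop := min n (i + mydistance + 1)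
      if start < stop ∧ PySem.List.pyGetD pr stop 0 - PySem.List.pyGetD pr start 0 > 0 then true
      else check_tokens_alt_loop s1 pr n mydistance rest
    else check_tokens_alt_loop s1 pr n mydistance rest

def check_tokens_alt (tokenlist : List String) (forms_1 : List String) (forms_2 : List String) (mydistance : Int) : Bool :=
  let s1 := PySem.Set.ofList forms_1
  let s2 := PySem.Set.ofList forms_2
  let pr := (check_tokens_alt_prefix s2 tokenlist).1
  check_tokens_alt_loop s1 pr (tokenlist.length : Int) mydistance (PySem.List.enumerate tokenlist 0)

-- ===== PRECONDITION & SPEC =====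
def Spec_check_tokens (tokenlist : List String) (forms_1 : List String) (forms_2 : List String) (mydistance : Int) (out : Bool) : Prop := out = check_tokens_alt tokenlist forms_1 forms_2 mydistance
instance (tokenlist : List String) (forms_1 : List String) (forms_2 : List String) (mydistance : Int) (out : Bool) : Decidable (Spec_check_tokens tokenlist forms_1 forms_2 mydistance out) := by unfold Spec_check_tokens; infer_instance

-- ===== CLAIM (what is proved, stated in full; the proofs are below) =====
def Claim_equal_check_tokens : Prop := ∀ (tokenlist : List String) (forms_1 : List String) (forms_2 : List String) (mydistance : Int), Dom_check_tokens tokenlist forms_1 forms_2 mydistance → Spec_check_tokens tokenlist forms_1 forms_2 mydistance (check_tokens tokenlist forms_1 forms_2 mydistance)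

-- ===== LEMMAS AND PROOFS =====

-- membership in set(l) is membership in l
theorem pv_set_contains (l : List String) (x : String) :
    PySem.Set.contains (PySem.Set.ofList l) x = l.contains x := by
  by_cases h : x ∈ l <;>
    simp [PySem.Set.contains_eq_listContains, PySem.Set.mem_ofList, h]

-- the prefix list built by Source B is the list of prefix counts
theorem pv_prefix_eq (p : String → Bool) (s2 : PySem.Set String)
    (hp : ∀ x, PySem.Set.contains s2 x = p x) (xs : List String) :
    check_tokens_alt_prefix s2 xs
      = ((List.range (xs.length + 1)).map (fun k => ((xs.take k).countP p : Int)),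
         (xs.countP p : Int)) := by
  induction xs using List.reverseRecOn with
  | nil => simp [check_tokens_alt_prefix]
  | append_singleton xs x ih =>
    have hcnt : (((xs ++ [x]).countP p : Int))
        = if p x = true then (xs.countP p : Int) + 1 else (xs.countP p : Int) := by
      simp only [List.countP_append, List.countP_cons, List.countP_nil]
      split_ifs with h <;> simp [h] <;> push_cast <;> ring
    have hmap : (List.range (xs.length + 1 + 1)).map
          (fun k => ((((xs ++ [x]).take k).countP p : Int)))
        = (List.range (xs.length + 1)).map (fun k => ((xs.take k).countP p : Int))
            ++ [(((xs ++ [x]).countP p : Int))] := by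
      rw [List.range_succ, List.map_append]
      congr 1
      · apply List.map_congr_left
        intro k hk
        simp only [List.mem_range] at hk
        rw [List.take_append_of_le_length (by omega)]
      · simp only [List.map_cons, List.map_nil]
        rw [List.take_of_length_le (by simp)]
    unfold check_tokens_alt_prefix at ih ⊢
    rw [List.foldl_append, ih]
    simp only [List.foldl_cons, List.foldl_nil, hp x, List.length_append,
      List.length_singleton]
    rw [hmap, hcnt]

-- core: the window scan of A equals Source B's prefix-difference test
theorem pv_window (p : String → Bool) (xs : List String)
    (pr : List Int)
    (hpr : pr = (List.range (xs.length + 1)).map (fun k => ((xs.take k).countP p : Int)))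
    (a b : Int) (ha : 0 ≤ a) (hb : b ≤ (xs.length : Int)) :
    ((PySem.List.pyRange a b 1).any (fun j => p (PySem.List.pyGetD xs j "")) = true)
      ↔ (a < b ∧ PySem.List.pyGetD pr b 0 - PySem.List.pyGetD pr a 0 > 0) := by
  by_cases hab : b ≤ a
  · rw [PySem.List.pyRange_one_eq_nil hab]
    simp
    omega
  · have hab' : a < b := by omega
    have hb0 : 0 ≤ b := by omega
    have hAB : a.toNat < b.toNat := by omega
    have hBlen : b.toNat ≤ xs.length := by omega
    have hprlen : pr.length = xs.length + 1 := by simp [hpr]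
    have hget : ∀ (c : Int), 0 ≤ c → c ≤ (xs.length : Int) →
        PySem.List.pyGetD pr c 0 = ((xs.take c.toNat).countP p : Int) := by
      intro c hc0 hc1
      rw [PySem.List.pyGetD_eq_getElem pr 0 hc0 (by omega)]
      simp [hpr]
    rw [hget a ha (by omega), hget b hb0 hb]
    have hsplit : PySem.List.pyRange a (xs.length : Int) 1
        = PySem.List.pyRange a b 1 ++ PySem.List.pyRange b (xs.length : Int) 1 :=
      PySem.List.pyRange_one_append a b _ (le_of_lt hab') hb
    have hfull : (PySem.List.pyRange a b 1).map (fun j => PySem.List.pyGetD xs j "")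
          ++ (PySem.List.pyRange b (xs.length : Int) 1).map (fun j => PySem.List.pyGetD xs j "")
        = xs.drop a.toNat := by
      rw [← List.map_append, ← hsplit, PySem.List.map_pyGetD_pyRange' xs "" ha]
    have hlen1 : ((PySem.List.pyRange a b 1).map (fun j => PySem.List.pyGetD xs j "")).length
        = b.toNat - a.toNat := by
      simp [PySem.List.length_pyRange_one]
      omega
    have hseg : (PySem.List.pyRange a b 1).map (fun j => PySem.List.pyGetD xs j "")
        = (xs.drop a.toNat).take (b.toNat - a.toNat) := by
      rw [← hfull, ← hlen1, List.take_left]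
    have hdec : (xs.take b.toNat).countP p
        = (xs.take a.toNat).countP p + ((xs.drop a.toNat).take (b.toNat - a.toNat)).countP p := by
      have h : b.toNat = a.toNat + (b.toNat - a.toNat) := by omega
      conv_lhs => rw [h, List.take_add]
      rw [List.countP_append]
    have hany : ((PySem.List.pyRange a b 1).any (fun j => p (PySem.List.pyGetD xs j "")) = true)
        ↔ ∃ x ∈ (xs.drop a.toNat).take (b.toNat - a.toNat), p x = true := by
      rw [← hseg, List.any_eq_true]
      simp only [List.mem_map]
      constructor
      · rintro ⟨j, hj, hpj⟩; exact ⟨_, ⟨j, hj, rfl⟩, hpj⟩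
      · rintro ⟨x, ⟨j, hj, rfl⟩, hpj⟩; exact ⟨j, hj, hpj⟩
    rw [hany, ← List.countP_pos_iff]
    constructor
    · intro h
      exact ⟨hab', by omega⟩
    · rintro ⟨-, h⟩
      omega

theorem pv_loops_eq (tokenlist forms_1 forms_2 : List String) (mydistance : Int)
    (l : List (Int × String)) :
    check_tokens_loop tokenlist forms_1 forms_2 mydistance l
      = check_tokens_alt_loop (PySem.Set.ofList forms_1)
          ((check_tokens_alt_prefix (PySem.Set.ofList forms_2) tokenlist).1)
          (tokenlist.length : Int) mydistance l := by
  induction l with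
  | nil => rfl
  | cons hd tl ih =>
    obtain ⟨i, t⟩ := hd
    have hpr : (check_tokens_alt_prefix (PySem.Set.ofList forms_2) tokenlist).1
        = (List.range (tokenlist.length + 1)).map
            (fun k => (((tokenlist.take k).countP (fun x => forms_2.contains x)) : Int)) := by
      rw [pv_prefix_eq (fun x => forms_2.contains x) _ (pv_set_contains forms_2) tokenlist]
    have hw := pv_window (fun x => forms_2.contains x) tokenlist _ hpr
      (max 0 (i - mydistance)) (min (tokenlist.length : Int) (i + mydistance + 1))
      (le_max_left 0 _) (min_le_left _ _)
    unfold check_tokens_loop check_tokens_alt_loop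
    rw [pv_set_contains forms_1 t]
    by_cases h1 : forms_1.contains t = true
    · simp only [h1, if_true]
      by_cases hc : ((PySem.List.pyRange (max 0 (i - mydistance))
            (min (tokenlist.length : Int) (i + mydistance + 1)) 1).any
            (fun j => forms_2.contains (PySem.List.pyGetD tokenlist j "")) = true)
      · rw [if_pos hc, if_pos (hw.mp hc)]
      · rw [if_neg hc, if_neg (fun hp => hc (hw.mpr hp)), ih]
    · rw [if_neg h1, if_neg h1, ih]

-- ===== VERDICT (by name: the statement is the Claim_ definition above) =====
theorem check_tokens_spec : Claim_equal_check_tokens := by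
  intro tokenlist forms_1 forms_2 mydistance _
  unfold Spec_check_tokens check_tokens check_tokens_alt
  exact pv_loops_eq tokenlist forms_1 forms_2 mydistance _
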